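-- pv_equiv track=rewrite | github.com/tomiya713-lab/oshime-bot | BBreturn.py | jq_pick_latest_and_prev
-- ===== SOURCE A (Python) =====
-- from typing import Optional, Dict, Any, List, Tuple
--
-- def jq_pick_latest_and_prev(records: List[Dict[str, Any]]) -> Tuple[Optional[Dict[str, Any]], Optional[Dict[str, Any]]]:
--     """Pick latest record and a previous-year comparable record (same CurPerType) if possible."""
--     if not records:
--         return None, None
--     latest = records[0]
--
--     # Try to find same CurPerType and CurPerEn about 1 year earlier
--     cur_type = (latest.get("CurPerType") or "").strip()
--     cur_end = (latest.get("CurPerEn") or "").strip()  # YYYY-MM-DD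
--     prev = None
--     try:
--         if cur_end:
--             y, m, d = [int(x) for x in cur_end.split("-")]
--             target = f"{y-1:04d}-{m:02d}-{d:02d}"
--         else:
--             target = ""
--     except Exception:
--         target = ""
--
--     if cur_type and target:
--         for r in records[1:]:
--             if (r.get("CurPerType") or "").strip() == cur_type and (r.get("CurPerEn") or "").strip() == target:
--                 prev = r
--                 break
--
--     # Fallback: same CurPerType, closest earlier CurPerEn
--     if prev is None and cur_type:
--         def end_key(x):
--             return (x.get("CurPerEn") or "")
--         candidates = [r for r in records[1:] if (r.get("CurPerType") or "").strip() == cur_type and (r.get("CurPerEn") or "") < (cur_end or "9999-99-99")]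
--         if candidates:
--             prev = sorted(candidates, key=end_key, reverse=True)[0]
--
--     return latest, prev
-- ===== SOURCE B (Python) =====
-- from typing import Optional, Dict, Any, List, Tuple
--
-- def jq_pick_latest_and_prev(records: List[Dict[str, Any]]) -> Tuple[Optional[Dict[str, Any]], Optional[Dict[str, Any]]]:
--     """Single linear pass: track the first exact previous-year match and the first
--     best 'closest earlier' record at the same time, then select."""
--     if not records:
--         return None, None
--     latest = records[0]
--     cur_type = (latest.get("CurPerType") or "").strip()
--     cur_end = (latest.get("CurPerEn") or "").strip()
--
--     target = ""
--     if cur_end: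
--         parts = cur_end.split("-")
--         try:
--             nums = [int(p) for p in parts]
--         except ValueError:
--             nums = None
--         if nums is not None and len(nums) == 3:
--             y, m, d = nums
--             target = f"{y-1:04d}-{m:02d}-{d:02d}"
--
--     bound = cur_end or "9999-99-99"
--     exact = None   # first record matching target (stripped ends)
--     best = None    # first record with maximal CurPerEn among the earlier ones
--     for r in records[1:]:
--         if (r.get("CurPerType") or "").strip() == cur_type:
--             if exact is None and target and (r.get("CurPerEn") or "").strip() == target:
--                 exact = r
--             e = r.get("CurPerEn") or ""
--             if e < bound and (best is None or (best.get("CurPerEn") or "") < e):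
--                 best = r
--
--     if not cur_type:
--         prev = None
--     elif target and exact is not None:
--         prev = exact
--     else:
--         prev = best
--     return latest, prev
-- ===== Notes on version B (the rewrite author's own statement) =====
-- stated objective: simpler
-- what changed: A's two separate scans (first-match loop, then a filter + descending stable sort whose head is taken) are replaced by one linear pass over records[1:] that simultaneously tracks the first exact previous-year match and the first record with maximal CurPerEn among the 'earlier' candidates (strict-greater update keeps the first of any tie), followed by a single selection step.
import Mathlib
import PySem

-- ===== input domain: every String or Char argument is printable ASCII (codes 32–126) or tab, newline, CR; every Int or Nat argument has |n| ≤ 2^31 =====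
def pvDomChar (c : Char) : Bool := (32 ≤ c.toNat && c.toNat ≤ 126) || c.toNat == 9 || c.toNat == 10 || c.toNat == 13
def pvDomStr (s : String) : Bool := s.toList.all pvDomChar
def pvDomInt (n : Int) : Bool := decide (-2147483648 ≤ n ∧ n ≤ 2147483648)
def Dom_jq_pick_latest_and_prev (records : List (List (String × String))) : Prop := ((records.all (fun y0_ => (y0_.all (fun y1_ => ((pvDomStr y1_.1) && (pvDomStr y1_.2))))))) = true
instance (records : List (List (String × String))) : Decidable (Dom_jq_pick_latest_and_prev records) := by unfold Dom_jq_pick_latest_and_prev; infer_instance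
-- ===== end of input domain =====

-- B replaces A's first-match scan plus filter-then-sort fallback by ONE pass that tracks the
-- exact match and the first maximal earlier record together (objective: simpler).

-- shared helpers (identical sub-expressions of both Pythons)
-- `(r.get(k) or "")` on the dict r (duplicate keys in the assoc list: Python's dict keeps the last)
def pvGet (r : List (String × String)) (k : String) : String :=
  ((PySem.Dict.ofList r).get? k).getD ""

-- f"{n:0wd}" for an int n (= str(n) zero-padded to width w after the sign): exact for all ints
def pvFmt0 (w : Nat) (n : Int) : String :=
  match PySem.Int.toChars n with
  | '-' :: t => String.ofList ('-' :: (List.replicate (w - 1 - t.length) '0' ++ t))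
  | cs => String.ofList (List.replicate (w - cs.length) '0' ++ cs)

-- the try/except block: target = f"{y-1:04d}-{m:02d}-{d:02d}" if cur_end splits into three ints, else ""
def pvTarget (cur_end : String) : String :=
  if cur_end = "" then ""
  else
    match ((PySem.Str.split? cur_end "-").getD []).map PySem.Int.ofStr? with
    | [some y, some m, some d] =>
        PySem.Str.join "-" [pvFmt0 4 (y - 1), pvFmt0 2 m, pvFmt0 2 d]
    | _ => ""

-- ===== PORT A =====
def jq_pick_latest_and_prev (records : List (List (String × String))) : (Option (List (String × String))) × (Option (List (String × String))) :=
  match records with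
  | [] => (none, none)
  | latest :: rest =>
    let cur_type := PySem.Str.strip (pvGet latest "CurPerType")
    let cur_end := PySem.Str.strip (pvGet latest "CurPerEn")
    let target := pvTarget cur_end
    -- first loop (for … break): first exact match, only when cur_type and target are truthy
    let prev0 : Option (List (String × String)) :=
      if cur_type ≠ "" ∧ target ≠ "" then
        rest.find? (fun r =>
          PySem.Str.strip (pvGet r "CurPerType") == cur_type &&
          PySem.Str.strip (pvGet r "CurPerEn") == target)
      else none
    -- fallback: `if prev is None and cur_type:` filter, sort descending (stable), take [0]
    let prev : Option (List (String × String)) :=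
      if prev0 = none ∧ cur_type ≠ "" then
        let bound := if cur_end = "" then "9999-99-99" else cur_end
        let candidates := rest.filter (fun r =>
          PySem.Str.strip (pvGet r "CurPerType") == cur_type &&
          decide (pvGet r "CurPerEn" < bound))
        -- `if candidates: prev = sorted(candidates, …)[0]`: head of the sort if any, else prev stays None
        (PySem.List.sorted candidates (fun r => pvGet r "CurPerEn") true).head?
      else prev0
    (some latest, prev)

-- ===== PORT B =====
def jq_pick_latest_and_prev_alt (records : List (List (String × String))) : (Option (List (String × String))) × (Option (List (String × String))) :=
  match records with
  | [] => (none, none)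
  | latest :: rest =>
    let cur_type := PySem.Str.strip (pvGet latest "CurPerType")
    let cur_end := PySem.Str.strip (pvGet latest "CurPerEn")
    let target := pvTarget cur_end
    let bound := if cur_end = "" then "9999-99-99" else cur_end
    -- one pass: (exact, best) accumulators, as in Source B's single loop
    let state := rest.foldl
      (fun (s : Option (List (String × String)) × Option (List (String × String))) r =>
        if PySem.Str.strip (pvGet r "CurPerType") == cur_type then
          ((if s.1 == none && (target != "" && PySem.Str.strip (pvGet r "CurPerEn") == target)
            then some r else s.1),
           (if decide (pvGet r "CurPerEn" < bound) &&
               (match s.2 with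
                | none => true
                | some c => decide (pvGet c "CurPerEn" < pvGet r "CurPerEn"))
            then some r else s.2))
        else s)
      (none, none)
    let prev : Option (List (String × String)) :=
      if cur_type = "" then none
      else if target != "" && state.1.isSome then state.1
      else state.2
    (some latest, prev)

-- ===== PRECONDITION & SPEC =====
def Spec_jq_pick_latest_and_prev (records : List (List (String × String))) (out : (Option (List (String × String))) × (Option (List (String × String)))) : Prop := out = jq_pick_latest_and_prev_alt records
instance (records : List (List (String × String))) (out : (Option (List (String × String))) × (Option (List (String × String)))) : Decidable (Spec_jq_pick_latest_and_prev records out) := by unfold Spec_jq_pick_latest_and_prev; infer_instance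

-- ===== CLAIM (what is proved, stated in full; the proofs are below) =====
def Claim_equal_jq_pick_latest_and_prev : Prop := ∀ (records : List (List (String × String))), Dom_jq_pick_latest_and_prev records → Spec_jq_pick_latest_and_prev records (jq_pick_latest_and_prev records)

-- ===== LEMMAS AND PROOFS =====

-- the 'first maximal key wins' step (what B's best-accumulator does on a candidate)
def pvMaxStep (key : List (String × String) → String)
    (b : Option (List (String × String))) (r : List (String × String)) :
    Option (List (String × String)) :=
  match b with
  | none => some r
  | some c => if key c < key r then some r else some c

-- a 'first match wins' fold is find?
theorem foldl_first_match (p : List (String × String) → Bool) :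
    ∀ (l : List (List (String × String))) (e : Option (List (String × String))),
      l.foldl (fun e r => if e == none && p r then some r else e) e
        = (match e with | some x => some x | none => l.find? p) := by
  intro l
  induction l with
  | nil => intro e; cases e <;> rfl
  | cons r l ih =>
      intro e
      cases e with
      | some x => simpa using ih (some x)
      | none =>
          simp only [List.foldl_cons, List.find?]
          cases h : p r
          · simpa [h] using ih none
          · simpa [h] using ih (some r)

-- head of the stable descending insertion sort = left fold of pvMaxStep
theorem head_foldl_insertBy (key : List (String × String) → String) :
    ∀ (l acc : List (List (String × String))),
      (l.foldl (fun acc x => PySem.List.insertBy (fun a b => decide (key b < key a)) x acc) acc).head?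
        = l.foldl (pvMaxStep key) acc.head? := by
  intro l
  induction l with
  | nil => intro acc; rfl
  | cons x l ih =>
      intro acc
      simp only [List.foldl_cons]
      rw [ih]
      congr 1
      cases acc with
      | nil => rfl
      | cons c t =>
          simp only [PySem.List.insertBy, pvMaxStep]
          by_cases h : key c < key x
          · simp [h]
          · simp [h]

theorem head_sorted_rev (key : List (String × String) → String)
    (l : List (List (String × String))) :
    (PySem.List.sorted l key true).head? = l.foldl (pvMaxStep key) none := by
  rw [PySem.List.sorted_rev_eq_foldl_insertBy]
  simpa using head_foldl_insertBy key l []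

-- B's paired fold computes (A's find?, head of A's descending sort of the candidates)
theorem b_fold_eq (ct tg bd : String) (rest : List (List (String × String))) :
    rest.foldl
      (fun (s : Option (List (String × String)) × Option (List (String × String))) r =>
        if PySem.Str.strip (pvGet r "CurPerType") == ct then
          ((if s.1 == none && (tg != "" && PySem.Str.strip (pvGet r "CurPerEn") == tg)
            then some r else s.1),
           (if decide (pvGet r "CurPerEn" < bd) &&
               (match s.2 with
                | none => true
                | some c => decide (pvGet c "CurPerEn" < pvGet r "CurPerEn"))
            then some r else s.2))
        else s)
      (none, none)
    = ((if tg = "" then none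
        else rest.find? (fun r =>
          PySem.Str.strip (pvGet r "CurPerType") == ct &&
          PySem.Str.strip (pvGet r "CurPerEn") == tg)),
       (PySem.List.sorted
          (rest.filter (fun r =>
            PySem.Str.strip (pvGet r "CurPerType") == ct &&
            decide (pvGet r "CurPerEn" < bd)))
          (fun r => pvGet r "CurPerEn") true).head?) := by
  have hsplit :
      (fun (s : Option (List (String × String)) × Option (List (String × String))) r =>
        if PySem.Str.strip (pvGet r "CurPerType") == ct then
          ((if s.1 == none && (tg != "" && PySem.Str.strip (pvGet r "CurPerEn") == tg)
            then some r else s.1),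
           (if decide (pvGet r "CurPerEn" < bd) &&
               (match s.2 with
                | none => true
                | some c => decide (pvGet c "CurPerEn" < pvGet r "CurPerEn"))
            then some r else s.2))
        else s)
      = fun s r =>
          ((fun e r =>
              if e == none && (PySem.Str.strip (pvGet r "CurPerType") == ct &&
                (tg != "" && PySem.Str.strip (pvGet r "CurPerEn") == tg))
              then some r else e) s.1 r,
           (fun b r =>
              if (PySem.Str.strip (pvGet r "CurPerType") == ct &&
                  decide (pvGet r "CurPerEn" < bd))
              then pvMaxStep (fun r => pvGet r "CurPerEn") b r else b) s.2 r) := by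
    funext s r
    by_cases h : (PySem.Str.strip (pvGet r "CurPerType") == ct) = true
    · cases hb : s.2 with
      | none => by_cases h2 : (decide (pvGet r "CurPerEn" < bd)) = true <;>
          simp [h, pvMaxStep]
      | some c =>
          by_cases h2 : (decide (pvGet r "CurPerEn" < bd)) = true <;>
          by_cases h3 : pvGet c "CurPerEn" < pvGet r "CurPerEn" <;>
          simp [h, h3, pvMaxStep]
    · simp [h]
  rw [hsplit, PySem.List.foldl_prod_mk
      (fun e r =>
        if e == none && (PySem.Str.strip (pvGet r "CurPerType") == ct &&
            (tg != "" && PySem.Str.strip (pvGet r "CurPerEn") == tg))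
        then some r else e)
      (fun b r =>
        if (PySem.Str.strip (pvGet r "CurPerType") == ct &&
            decide (pvGet r "CurPerEn" < bd))
        then pvMaxStep (fun r => pvGet r "CurPerEn") b r else b)]
  simp only [Prod.mk.injEq]
  refine ⟨?_, ?_⟩
  · -- exact component
    by_cases ht : tg = ""
    · simp [ht, List.foldl_fixed]
    · have hne : (tg != "") = true := by simp [ht]
      simp only [hne, Bool.true_and]
      rw [foldl_first_match (fun r =>
        PySem.Str.strip (pvGet r "CurPerType") == ct &&
        PySem.Str.strip (pvGet r "CurPerEn") == tg) rest none]
      simp [ht]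
  · -- best component
    rw [PySem.List.foldl_if_eq_foldl_filter
      (fun r => PySem.Str.strip (pvGet r "CurPerType") == ct &&
        decide (pvGet r "CurPerEn" < bd))
      (pvMaxStep (fun r => pvGet r "CurPerEn"))]
    exact (head_sorted_rev _ _).symm

-- ===== VERDICT (by name: the statement is the Claim_ definition above) =====
theorem jq_pick_latest_and_prev_spec : Claim_equal_jq_pick_latest_and_prev := by
  intro records _
  unfold Spec_jq_pick_latest_and_prev
  cases records with
  | nil => rfl
  | cons latest rest =>
    simp only [jq_pick_latest_and_prev, jq_pick_latest_and_prev_alt]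
    rw [b_fold_eq]
    by_cases h1 : PySem.Str.strip (pvGet latest "CurPerType") = ""
    · simp [h1]
    · by_cases h2 : pvTarget (PySem.Str.strip (pvGet latest "CurPerEn")) = ""
      · simp [h1, h2]
      · rcases hf : (List.find? (fun r =>
            PySem.Str.strip (pvGet r "CurPerType") == PySem.Str.strip (pvGet latest "CurPerType") &&
            PySem.Str.strip (pvGet r "CurPerEn") == pvTarget (PySem.Str.strip (pvGet latest "CurPerEn"))) rest) with _ | p
        · simp [h1, h2]
        · simp [h1, h2]
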